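-- pv_equiv track=rewrite | github.com/hjonghyeok/coding_trainning | 프로그래머스/기초테스트/한 번만 등장한 문자.py | solution
-- ===== SOURCE A (Python) =====
-- def solution(s):
--     answer = ''
--     a = ''
--     for i in s:
--         if i not in answer and i not in a:
--             answer += i
--         elif i in answer or i in a:
--             answer = answer.replace(i, '')
--             a += i
--     answer = sorted(list(answer))
--     return ''.join(answer)
-- ===== SOURCE B (Python) =====
-- def solution(s):
--     t = sorted(s)
--     out = []
--     i = 0
--     n = len(t)
--     while i < n:
--         j = i
--         while j < n and t[j] == t[i]:
--             j += 1
--         if j - i == 1: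
--             out.append(t[i])
--         i = j
--     return ''.join(out)
-- ===== Notes on version B (the rewrite author's own statement) =====
-- stated objective: alternative
-- what changed: B sorts the string once and makes a single run-length scan over the sorted characters, emitting a character exactly when its run has length 1 (already in order), instead of A's per-character membership tests and replace() calls on two growing pools followed by a final sort.
import Mathlib
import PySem

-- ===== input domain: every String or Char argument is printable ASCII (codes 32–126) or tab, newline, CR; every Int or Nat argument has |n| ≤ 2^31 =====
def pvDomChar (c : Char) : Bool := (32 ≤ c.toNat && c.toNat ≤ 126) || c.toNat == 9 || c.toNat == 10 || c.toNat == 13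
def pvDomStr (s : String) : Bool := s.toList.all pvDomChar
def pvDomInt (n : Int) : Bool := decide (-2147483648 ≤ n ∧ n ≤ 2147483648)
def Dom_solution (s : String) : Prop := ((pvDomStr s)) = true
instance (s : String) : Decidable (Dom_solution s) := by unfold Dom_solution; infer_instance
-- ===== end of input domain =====

-- B sorts the string first and scans maximal runs, emitting length-1 runs (already in order);
-- A maintains once-seen / more-than-once-seen pools and sorts at the end. Objective: alternative decomposition.


-- ===== PORT A =====
-- the for-loop over s with state (answer, a); 'i in answer' on a one-character i is membership,
-- and answer.replace(i, '') removes every occurrence of i — both exact for single characters.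
def solLoop (l : List Char) (ans a : List Char) : List Char × List Char :=
  match l with
  | [] => (ans, a)
  | i :: rest =>
    if i ∉ ans ∧ i ∉ a then solLoop rest (ans ++ [i]) a
    else if i ∈ ans ∨ i ∈ a then solLoop rest (ans.filter (fun x => x != i)) (a ++ [i])
    else solLoop rest ans a

def solution (s : String) : String :=
  let p := solLoop s.toList [] []
  String.ofList (PySem.List.sorted p.1 (fun x => x) false)

-- ===== PORT B =====
-- the while loop: advance j past the run of t[i]; emit t[i] iff the run has length 1
def scanRuns (t : List Char) : List Char :=
  match t with
  | [] => []
  | c :: rest =>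
    if rest.takeWhile (· == c) = [] then c :: scanRuns (rest.dropWhile (· == c))
    else scanRuns (rest.dropWhile (· == c))
termination_by t.length
decreasing_by
  · exact Nat.lt_succ_of_le (List.length_dropWhile_le _ _)
  · exact Nat.lt_succ_of_le (List.length_dropWhile_le _ _)

def solution_alt (s : String) : String :=
  String.ofList (scanRuns (PySem.List.sorted s.toList (fun x => x) false))

-- ===== PRECONDITION & SPEC =====
def Spec_solution (s : String) (out : String) : Prop := out = solution_alt s
instance (s : String) (out : String) : Decidable (Spec_solution s out) := by unfold Spec_solution; infer_instance

-- ===== CLAIM (what is proved, stated in full; the proofs are below) =====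
def Claim_equal_solution : Prop := ∀ (s : String), Dom_solution s → Spec_solution s (solution s)

-- ===== LEMMAS AND PROOFS =====

-- A-side invariant: ans holds exactly the chars seen once so far, a the chars seen twice or more
lemma solLoop_inv (l : List Char) (ans a : List Char) (f : Char → Nat)
    (hnd : ans.Nodup)
    (hans : ∀ c, c ∈ ans ↔ f c = 1)
    (ha : ∀ c, c ∈ a ↔ 2 ≤ f c) :
    (solLoop l ans a).1.Nodup ∧
    ∀ c, c ∈ (solLoop l ans a).1 ↔ f c + l.count c = 1 := by
  induction l generalizing ans a f with
  | nil =>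
    refine ⟨hnd, fun c => ?_⟩
    simpa using hans c
  | cons i rest ih =>
    by_cases hi : i ∉ ans ∧ i ∉ a
    · have hfi : f i = 0 := by
        have h1 : f i ≠ 1 := fun h => hi.1 ((hans i).2 h)
        have h2 : ¬ 2 ≤ f i := fun h => hi.2 ((ha i).2 h)
        omega
      have step := ih (ans ++ [i]) a (fun c => if c = i then f c + 1 else f c)
        (by
          simp only [List.nodup_append, hnd, List.nodup_singleton, true_and]
          intro x hx b hb
          simp only [List.mem_singleton] at hb
          subst hb
          exact fun hEq => hi.1 (hEq ▸ hx))
        (by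
          intro c
          by_cases hc : c = i
          · subst hc; simp [hfi]
          · simp [hc, hans c, List.mem_append])
        (by
          intro c
          by_cases hc : c = i
          · subst hc; simpa [hfi] using hi.2
          · simp [hc, ha c])
      rw [solLoop, if_pos hi]
      refine ⟨step.1, fun c => ?_⟩
      rw [(step.2 c)]
      by_cases hc : c = i
      · subst hc; simp; omega
      · simp [hc, Ne.symm hc]
    · push Not at hi
      have hor : i ∈ ans ∨ i ∈ a := by
        by_cases h : i ∈ ans
        · exact Or.inl h
        · exact Or.inr (hi h)
      have hfi : 1 ≤ f i := by
        rcases hor with h | h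
        · have := (hans i).1 h; omega
        · have := (ha i).1 h; omega
      have step := ih (ans.filter (fun x => x != i)) (a ++ [i])
        (fun c => if c = i then f c + 1 else f c)
        (hnd.filter _)
        (by
          intro c
          by_cases hc : c = i
          · subst hc; simp; omega
          · simp [List.mem_filter, hc, hans c])
        (by
          intro c
          by_cases hc : c = i
          · subst hc; simp; omega
          · simp [hc, ha c])
      rw [solLoop, if_neg (by tauto), if_pos hor]
      refine ⟨step.1, fun c => ?_⟩
      rw [(step.2 c)]
      by_cases hc : c = i
      · subst hc; simp; omega
      · simp [hc, Ne.symm hc]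

lemma mem_scanRuns {t : List Char} {x : Char} (h : x ∈ scanRuns t) : x ∈ t := by
  fun_induction scanRuns t with
  | case1 => simp at h
  | case2 c rest htk ih =>
    rcases List.mem_cons.1 h with h | h
    · simp [h]
    · exact List.mem_cons_of_mem _ ((List.dropWhile_sublist _).subset (ih h))
  | case3 c rest htk ih =>
    exact List.mem_cons_of_mem _ ((List.dropWhile_sublist _).subset (ih h))

-- in a sorted list whose head is c, everything after the leading run of c's is strictly greater
lemma dropWhile_gt (c : Char) (l : List Char) (hp : l.Pairwise (· ≤ ·))
    (hall : ∀ x ∈ l, c ≤ x) : ∀ x ∈ l.dropWhile (· == c), c < x := by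
  induction l with
  | nil => simp
  | cons y ys ih =>
    by_cases hy : y = c
    · subst hy
      rw [List.dropWhile_cons_of_pos (by simp)]
      exact ih hp.of_cons (fun x hx => le_trans (hall y (List.mem_cons_self)) (List.rel_of_pairwise_cons hp hx))
    · rw [List.dropWhile_cons_of_neg (by simpa using hy)]
      intro x hx
      have hcy : c < y := lt_of_le_of_ne (hall y List.mem_cons_self) (Ne.symm hy)
      rcases List.mem_cons.1 hx with h | h
      · exact h ▸ hcy
      · exact lt_of_lt_of_le hcy (List.rel_of_pairwise_cons hp h)

lemma scanRuns_spec (t : List Char) (hs : t.Pairwise (· ≤ ·)) :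
    (scanRuns t).Pairwise (· < ·) ∧ ∀ c, c ∈ scanRuns t ↔ t.count c = 1 := by
  fun_induction scanRuns t with
  | case1 => simp
  | case2 c rest htk ih =>
    have hdrop : rest.dropWhile (· == c) = rest := by
      cases rest with
      | nil => rfl
      | cons y ys =>
        by_cases h : (y == c) = true
        · simp [h] at htk
        · exact List.dropWhile_cons_of_neg (by simpa using h)
    rw [hdrop] at ih ⊢
    have hrest' : ∀ x ∈ rest, c < x := by
      have h := dropWhile_gt c rest hs.of_cons (fun x hx => List.rel_of_pairwise_cons hs hx)
      rwa [hdrop] at h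
    obtain ⟨ihp, ihm⟩ := ih hs.of_cons
    constructor
    · exact List.pairwise_cons.2 ⟨fun x hx => hrest' x (mem_scanRuns hx), ihp⟩
    · intro d
      by_cases hd : d = c
      · subst hd
        have h0 : rest.count d = 0 :=
          List.count_eq_zero.2 (fun hmem => absurd (hrest' d hmem) (lt_irrefl d))
        simp [h0]
      · rw [List.mem_cons, List.count_cons]
        simp [hd, ihm d, Ne.symm hd]
  | case3 c rest htk ih =>
    have hrest' := dropWhile_gt c rest hs.of_cons (fun x hx => List.rel_of_pairwise_cons hs hx)
    have hsplit := List.takeWhile_append_dropWhile (p := (· == c)) (l := rest)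
    have hpdrop : (rest.dropWhile (· == c)).Pairwise (· ≤ ·) :=
      hs.of_cons.sublist (List.dropWhile_sublist _)
    obtain ⟨ihp, ihm⟩ := ih hpdrop
    refine ⟨ihp, fun d => ?_⟩
    have htake : ∀ x ∈ rest.takeWhile (· == c), x = c := by
      intro x hx
      simpa using List.mem_takeWhile_imp hx
    by_cases hd : d = c
    · subst hd
      have hcd : d ∉ scanRuns (rest.dropWhile (· == d)) := by
        intro hmem
        exact absurd (hrest' d (mem_scanRuns hmem)) (lt_irrefl d)
      have hlen : 1 ≤ (rest.takeWhile (· == d)).length := by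
        cases h : rest.takeWhile (· == d) with
        | nil => exact absurd h htk
        | cons a b => simp
      have hcnt : (rest.takeWhile (· == d)).length ≤ rest.count d := by
        calc (rest.takeWhile (· == d)).length
            = (rest.takeWhile (· == d)).count d := by
              rw [List.count_eq_length.2 (fun x hx => (htake x hx) ▸ rfl)]
          _ ≤ rest.count d := (List.takeWhile_sublist _).count_le d
      simp only [hcd, false_iff]
      rw [List.count_cons]
      simp
      omega
    · rw [ihm d, List.count_cons]
      have h1 : (rest.takeWhile (· == c)).count d = 0 := by
        rw [List.count_eq_zero]
        exact fun hmem => hd (htake d hmem)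
      have h2 : rest.count d = (rest.takeWhile (· == c)).count d + (rest.dropWhile (· == c)).count d := by
        conv_lhs => rw [← hsplit]
        rw [List.count_append]
      simp [Ne.symm hd, h2, h1]

-- ===== VERDICT (by name: the statement is the Claim_ definition above) =====
-- ties the two characterisations together: sorted(answer) is exactly scanRuns(sorted s)
lemma solution_eq_alt (s : String) : solution s = solution_alt s := by
  unfold solution solution_alt
  obtain ⟨hnd, hmem⟩ :=
    solLoop_inv s.toList [] [] (fun _ => 0) List.nodup_nil (by simp) (by simp)
  have hts : (PySem.List.sorted s.toList (fun x => x) false).Pairwise (· ≤ ·) := by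
    simpa using PySem.List.sorted_pairwise (xs := s.toList) (key := fun x => x)
  obtain ⟨hrp, hrm⟩ := scanRuns_spec _ hts
  have hperm : (scanRuns (PySem.List.sorted s.toList (fun x => x) false)).Perm
      (solLoop s.toList [] []).1 := by
    rw [List.perm_ext_iff_of_nodup (hrp.imp ne_of_lt) hnd]
    intro c
    rw [hrm c, hmem c]
    have hcnt : (PySem.List.sorted s.toList (fun x => x) false).count c = s.toList.count c :=
      (PySem.List.sorted_perm _ _ _).count_eq c
    omega
  show String.ofList (PySem.List.sorted (solLoop s.toList [] []).1 (fun x => x) false) = _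
  have hsorted := PySem.List.sorted_eq_of_perm_of_pairwise_lt _ _ (fun x : Char => x) hperm hrp
  rw [hsorted]

theorem solution_spec : Claim_equal_solution := by
  intro s _
  exact solution_eq_alt s
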